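-- pv_equiv track=rewrite | github.com/Nagmacoder/Barcode_serial_reader | utils.py | correct_serial
-- ===== SOURCE A (Python) =====
-- def correct_serial(text):
--     """Fix common OCR mistakes"""
--     corrections = {
--         'O': '0', 'I': '1', 'l': '1',
--         'B': '8', 'Z': '2', 'S': '5'
--     }
--     for wrong, right in corrections.items():
--         text = text.replace(wrong, right)
--     return text.strip("*#")  # Remove special chars
-- ===== SOURCE B (Python) =====
-- def correct_serial(text):
--     """Fix common OCR mistakes"""
--     corrections = {
--         'O': '0', 'I': '1', 'l': '1',
--         'B': '8', 'Z': '2', 'S': '5'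
--     }
--     return ''.join(corrections.get(c, c) for c in text).strip("*#")
-- ===== Notes on version B (the rewrite author's own statement) =====
-- stated objective: simpler
-- what changed: Replaces the six sequential full-string .replace() passes with a single pass that maps each character once through the corrections dict and joins the result, then applies the same final strip of special characters.
import Mathlib
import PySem

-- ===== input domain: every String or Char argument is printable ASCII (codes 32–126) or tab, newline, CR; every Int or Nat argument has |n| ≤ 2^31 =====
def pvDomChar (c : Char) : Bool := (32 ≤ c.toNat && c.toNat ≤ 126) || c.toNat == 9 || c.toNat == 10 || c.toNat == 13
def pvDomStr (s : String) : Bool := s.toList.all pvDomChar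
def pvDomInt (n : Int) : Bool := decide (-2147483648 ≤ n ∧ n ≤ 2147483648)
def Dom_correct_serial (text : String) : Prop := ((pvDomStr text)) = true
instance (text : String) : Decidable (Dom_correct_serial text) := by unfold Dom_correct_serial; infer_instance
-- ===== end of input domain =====

-- B replaces A's six sequential full-string replace passes with a single per-character
-- mapping pass followed by the same strip("*#"); objective: simpler (one pass, no rescans).

-- ===== PORT A =====
def correct_serial (text : String) : String :=
  let t1 := PySem.Str.replace text "O" "0"
  let t2 := PySem.Str.replace t1 "I" "1"
  let t3 := PySem.Str.replace t2 "l" "1"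
  let t4 := PySem.Str.replace t3 "B" "8"
  let t5 := PySem.Str.replace t4 "Z" "2"
  let t6 := PySem.Str.replace t5 "S" "5"
  PySem.Str.stripChars t6 "*#"

-- ===== PORT B =====
-- corrections.get(c, c) of Source B, ported as a direct match on the six keys
def pvFixChar (c : Char) : Char :=
  match c with
  | 'O' => '0' | 'I' => '1' | 'l' => '1' | 'B' => '8' | 'Z' => '2' | 'S' => '5' | _ => c

def correct_serial_alt (text : String) : String :=
  PySem.Str.stripChars (String.ofList (text.toList.map pvFixChar)) "*#"

-- ===== PRECONDITION & SPEC =====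
def Spec_correct_serial (text : String) (out : String) : Prop := out = correct_serial_alt text
instance (text : String) (out : String) : Decidable (Spec_correct_serial text out) := by unfold Spec_correct_serial; infer_instance

-- ===== CLAIM (what is proved, stated in full; the proofs are below) =====
def Claim_equal_correct_serial : Prop := ∀ (text : String), Dom_correct_serial text → Spec_correct_serial text (correct_serial text)

-- ===== LEMMAS AND PROOFS =====

-- the fuel loop of Chars.replace, specialised to a single-char pattern, is a map
theorem pv_go_single (a b : Char) : ∀ (l : List Char) (fuel : Nat) (acc : List Char), l.length ≤ fuel →
    PySem.Chars.replace.go [a] [b] fuel l acc = acc.reverse ++ l.map (fun c => if c = a then b else c) := by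
  intro l
  induction l with
  | nil => intro fuel acc h; cases fuel <;> simp [PySem.Chars.replace.go]
  | cons c t ih =>
    intro fuel acc h
    cases fuel with
    | zero => simp at h
    | succ f =>
      rw [PySem.Chars.replace.go]
      by_cases hc : c = a
      · subst hc
        simp [List.isPrefixOf, ih f (b :: acc) (by simpa using h)]
      · simp [List.isPrefixOf, hc, Ne.symm hc, ih f (c :: acc) (by simpa using h)]

theorem pv_replace_single (a b : Char) (l : List Char) :
    PySem.Chars.replace l [a] [b] = l.map (fun c => if c = a then b else c) := by
  rw [PySem.Chars.replace]
  simp [pv_go_single a b l l.length [] le_rfl]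

-- the six replacements composed pointwise are exactly B's per-character correction
theorem pv_chain_point (c : Char) :
    (fun c => if c = 'S' then '5' else c)
      ((fun c => if c = 'Z' then '2' else c)
        ((fun c => if c = 'B' then '8' else c)
          ((fun c => if c = 'l' then '1' else c)
            ((fun c => if c = 'I' then '1' else c)
              ((fun c => if c = 'O' then '0' else c) c))))) = pvFixChar c := by
  unfold pvFixChar
  split <;> simp_all

-- ===== VERDICT (by name: the statement is the Claim_ definition above) =====
theorem pv_chain_list (l : List Char) :
    PySem.Chars.replace (PySem.Chars.replace (PySem.Chars.replace (PySem.Chars.replace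
      (PySem.Chars.replace (PySem.Chars.replace l ['O'] ['0']) ['I'] ['1']) ['l'] ['1'])
      ['B'] ['8']) ['Z'] ['2']) ['S'] ['5'] = l.map pvFixChar := by
  simp only [pv_replace_single, List.map_map, Function.comp_def]
  exact List.map_congr_left (fun c _ => pv_chain_point c)

theorem correct_serial_spec : Claim_equal_correct_serial := by
  intro text _
  show correct_serial text = correct_serial_alt text
  have h : ("O" : String).toList = ['O'] ∧ ("0" : String).toList = ['0'] ∧
      ("I" : String).toList = ['I'] ∧ ("1" : String).toList = ['1'] ∧
      ("l" : String).toList = ['l'] ∧ ("B" : String).toList = ['B'] ∧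
      ("8" : String).toList = ['8'] ∧ ("Z" : String).toList = ['Z'] ∧
      ("2" : String).toList = ['2'] ∧ ("S" : String).toList = ['S'] ∧
      ("5" : String).toList = ['5'] := by decide
  obtain ⟨h1, h2, h3, h4, h5, h6, h7, h8, h9, h10, h11⟩ := h
  simp only [correct_serial, correct_serial_alt, PySem.Str.stripChars, PySem.Str.toList_replace,
    String.toList_ofList, h1, h2, h3, h4, h5, h6, h7, h8, h9, h10, h11, pv_chain_list]
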